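-- pv_equiv track=rewrite | github.com/gladstoneai/POWERplay | src/lib/utils/graph.py | get_unique_single_agent_actions_from_joint_actions
-- ===== SOURCE A (Python) =====
-- def multiagent_state_to_single_agent_states(multiagent_state):
--     return [state.split('_')[0] for state in multiagent_state.split('^')]
--
-- def multiagent_action_to_single_agent_actions(multiagent_action):
--     return multiagent_state_to_single_agent_states(multiagent_action)
--
-- def get_unique_single_agent_actions_from_joint_actions(joint_actions):
--     action_pairs = [
--         multiagent_action_to_single_agent_actions(joint_action) for joint_action in joint_actions
--     ]
--
--     return [
--         sorted(set([action_pair[0] for action_pair in action_pairs])), # Agent A actions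
--         sorted(set([action_pair[1] for action_pair in action_pairs])) # Agent B actions
--     ]
-- ===== SOURCE B (Python) =====
-- def _insert_unique(xs, x):
--     # keep xs sorted and duplicate-free: walk past smaller elements, insert unless present
--     i = 0
--     while i < len(xs) and xs[i] < x:
--         i += 1
--     if i == len(xs) or xs[i] != x:
--         xs.insert(i, x)
--
-- def get_unique_single_agent_actions_from_joint_actions(joint_actions):
--     agent_a = []
--     agent_b = []
--     for joint_action in joint_actions:
--         parts = joint_action.split('^')
--         _insert_unique(agent_a, parts[0].split('_')[0])
--         _insert_unique(agent_b, parts[1].split('_')[0])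
--     return [agent_a, agent_b]
-- ===== Notes on version B (the rewrite author's own statement) =====
-- stated objective: alternative
-- what changed: Replaced the build-all-pairs list, the two set-comprehension dedup scans and the final sorts by a single pass that maintains two sorted duplicate-free lists directly via ordered insertion (no sets, no sort call).
import Mathlib
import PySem

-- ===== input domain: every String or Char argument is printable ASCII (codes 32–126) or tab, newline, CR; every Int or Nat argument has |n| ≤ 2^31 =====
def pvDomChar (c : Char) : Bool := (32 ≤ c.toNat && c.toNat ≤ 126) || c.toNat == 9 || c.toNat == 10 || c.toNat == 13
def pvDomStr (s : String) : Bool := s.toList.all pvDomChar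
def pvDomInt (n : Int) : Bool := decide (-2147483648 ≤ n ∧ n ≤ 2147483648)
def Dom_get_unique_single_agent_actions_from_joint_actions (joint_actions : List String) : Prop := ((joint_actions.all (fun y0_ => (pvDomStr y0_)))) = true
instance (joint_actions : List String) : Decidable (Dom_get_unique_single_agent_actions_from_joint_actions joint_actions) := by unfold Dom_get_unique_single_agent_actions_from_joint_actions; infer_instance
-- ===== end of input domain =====

-- B replaces A's pairs list, set-based dedup and final sorts by one pass maintaining two sorted
-- duplicate-free lists via ordered insertion (objective: alternative, similar cost).

-- s.split(sep) for the non-empty literal separators used here ('^', '_'); the getD [] branch is unreachable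
def pySplit (s sep : String) : List String := (PySem.Str.split? s sep).getD []

-- ===== PORT A =====
-- multiagent_state_to_single_agent_states / multiagent_action_to_single_agent_actions
def multiagent_action_to_single_agent_actions (multiagent_action : String) : List String :=
  (pySplit multiagent_action "^").map (fun state => (PySem.List.pyGet? (pySplit state "_") 0).getD "")

def get_unique_single_agent_actions_from_joint_actions (joint_actions : List String) : List (List String) :=
  let action_pairs := joint_actions.map multiagent_action_to_single_agent_actions
  [ PySem.List.sorted (PySem.Set.ofList (action_pairs.map (fun action_pair => (PySem.List.pyGet? action_pair 0).getD ""))) (fun x => x) false,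
    PySem.List.sorted (PySem.Set.ofList (action_pairs.map (fun action_pair => (PySem.List.pyGet? action_pair 1).getD ""))) (fun x => x) false ]

-- ===== PORT B =====
-- _insert_unique: walk past smaller elements, insert unless already present (keeps the list sorted, no duplicates)
def insertUniqueSorted (x : String) : List String → List String
  | [] => [x]
  | y :: t => if y < x then y :: insertUniqueSorted x t
              else if y = x then y :: t
              else x :: y :: t

def get_unique_single_agent_actions_from_joint_actions_alt (joint_actions : List String) : List (List String) :=
  let acc := joint_actions.foldl (fun (acc : List String × List String) joint_action =>
      let parts := pySplit joint_action "^"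
      ( insertUniqueSorted ((PySem.List.pyGet? (pySplit ((PySem.List.pyGet? parts 0).getD "") "_") 0).getD "") acc.1,
        insertUniqueSorted ((PySem.List.pyGet? (pySplit ((PySem.List.pyGet? parts 1).getD "") "_") 0).getD "") acc.2 ))
    ([], [])
  [acc.1, acc.2]

-- ===== PRECONDITION & SPEC =====
-- Pre_: every joint action contains '^' (otherwise both Pythons raise IndexError on parts[1])
def Pre_get_unique_single_agent_actions_from_joint_actions (joint_actions : List String) : Prop :=
  ∀ s ∈ joint_actions, '^' ∈ s.toList
instance (joint_actions : List String) : Decidable (Pre_get_unique_single_agent_actions_from_joint_actions joint_actions) := by unfold Pre_get_unique_single_agent_actions_from_joint_actions; infer_instance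
def pvWitness_get_unique_single_agent_actions_from_joint_actions : List String := ["a_1^b_2", "c^b"]

def Spec_get_unique_single_agent_actions_from_joint_actions (joint_actions : List String) (out : List (List String)) : Prop := out = get_unique_single_agent_actions_from_joint_actions_alt joint_actions
instance (joint_actions : List String) (out : List (List String)) : Decidable (Spec_get_unique_single_agent_actions_from_joint_actions joint_actions out) := by unfold Spec_get_unique_single_agent_actions_from_joint_actions; infer_instance

-- ===== CLAIM (what is proved, stated in full; the proofs are below) =====
def Claim_equal_get_unique_single_agent_actions_from_joint_actions : Prop := ∀ (joint_actions : List String), Dom_get_unique_single_agent_actions_from_joint_actions joint_actions → Pre_get_unique_single_agent_actions_from_joint_actions joint_actions → Spec_get_unique_single_agent_actions_from_joint_actions joint_actions (get_unique_single_agent_actions_from_joint_actions joint_actions)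

-- ===== LEMMAS AND PROOFS =====

-- a fold with a pair accumulator is the pair of the two independent folds
theorem foldl_pair {α β γ : Type} (f : β → α → β) (g : γ → α → γ) (l : List α) (b : β) (c : γ) :
    l.foldl (fun acc x => (f acc.1 x, g acc.2 x)) (b, c) = (l.foldl f b, l.foldl g c) := by
  induction l generalizing b c with
  | nil => rfl
  | cons x t ih => simp [List.foldl, ih]

theorem pyGet?_map_str (l : List String) (g : String → String) (i : Int) :
    PySem.List.pyGet? (l.map g) i = (PySem.List.pyGet? l i).map g := by
  simp [PySem.List.pyGet?, PySem.List.pyIdx?]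

-- B's per-item token expressions agree with A's pair projections
theorem elem_eq (j : String) (i : Int) :
    (PySem.List.pyGet? (pySplit ((PySem.List.pyGet? (pySplit j "^") i).getD "") "_") 0).getD ""
      = (PySem.List.pyGet? (multiagent_action_to_single_agent_actions j) i).getD "" := by
  unfold multiagent_action_to_single_agent_actions
  rw [pyGet?_map_str]
  cases PySem.List.pyGet? (pySplit j "^") i with
  | none => rfl
  | some x => rfl

theorem mem_insertUniqueSorted (x y : String) (acc : List String) :
    y ∈ insertUniqueSorted x acc ↔ y = x ∨ y ∈ acc := by
  induction acc with
  | nil => simp [insertUniqueSorted]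
  | cons z t ih =>
      unfold insertUniqueSorted
      split_ifs with h1 h2
      · simp only [List.mem_cons, ih]
        tauto
      · subst h2
        simp only [List.mem_cons]
        tauto
      · simp only [List.mem_cons]

theorem pairwise_insertUniqueSorted (x : String) (acc : List String)
    (h : acc.Pairwise (· < ·)) : (insertUniqueSorted x acc).Pairwise (· < ·) := by
  induction acc with
  | nil => simp [insertUniqueSorted]
  | cons z t ih =>
      rcases List.pairwise_cons.mp h with ⟨hz, ht⟩
      unfold insertUniqueSorted
      split_ifs with h1 h2
      · refine List.pairwise_cons.mpr ⟨?_, ih ht⟩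
        intro y hy
        rcases (mem_insertUniqueSorted x y t).mp hy with rfl | hyt
        · exact h1
        · exact hz y hyt
      · exact h
      · have hzx : x < z := lt_of_le_of_ne (not_lt.mp h1) (Ne.symm h2)
        refine List.pairwise_cons.mpr ⟨?_, h⟩
        intro y hy
        rcases List.mem_cons.mp hy with rfl | hyt
        · exact hzx
        · exact lt_trans hzx (hz y hyt)

-- folding ordered insertion over l, starting from a sorted accumulator, stays sorted and
-- collects exactly the elements of acc and l
theorem foldl_insertUniqueSorted_inv (l acc : List String) (h : acc.Pairwise (· < ·)) :
    (l.foldl (fun a x => insertUniqueSorted x a) acc).Pairwise (· < ·) ∧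
    ∀ y, y ∈ l.foldl (fun a x => insertUniqueSorted x a) acc ↔ y ∈ acc ∨ y ∈ l := by
  induction l generalizing acc with
  | nil => simpa using h
  | cons x t ih =>
      have h' := pairwise_insertUniqueSorted x acc h
      rcases ih (insertUniqueSorted x acc) h' with ⟨hp, hm⟩
      refine ⟨hp, fun y => ?_⟩
      rw [List.foldl_cons, hm y, mem_insertUniqueSorted]
      simp; tauto

-- the fold from [] is exactly sorted(set(l))
theorem foldl_insertUniqueSorted_eq (l : List String) :
    l.foldl (fun a x => insertUniqueSorted x a) []
      = PySem.List.sorted (PySem.Set.ofList l) (fun x => x) false := by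
  rcases foldl_insertUniqueSorted_inv l [] (by simp) with ⟨hp, hm⟩
  have hperm : (l.foldl (fun a x => insertUniqueSorted x a) []).Perm (PySem.Set.ofList l) := by
    refine (List.perm_ext_iff_of_nodup ?_ ?_).mpr ?_
    · exact hp.nodup
    · exact PySem.Set.nodup_ofList l
    · intro a
      rw [hm a, PySem.Set.mem_ofList]
      simp
  exact (PySem.List.sorted_eq_of_perm_of_pairwise_lt _ _ (fun x => x) hperm hp).symm

-- the fold of ordered insertion of g x is sorted(set(map g l))
theorem foldl_insU_comp (g : String → String) (l : List String) :
    l.foldl (fun a x => insertUniqueSorted (g x) a) []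
      = PySem.List.sorted (PySem.Set.ofList (l.map g)) (fun x => x) false := by
  rw [← foldl_insertUniqueSorted_eq (l.map g), List.foldl_map]

theorem get_unique_spec' (joint_actions : List String) :
    get_unique_single_agent_actions_from_joint_actions joint_actions
      = get_unique_single_agent_actions_from_joint_actions_alt joint_actions := by
  unfold get_unique_single_agent_actions_from_joint_actions get_unique_single_agent_actions_from_joint_actions_alt
  rw [foldl_pair
      (fun s j => insertUniqueSorted ((PySem.List.pyGet? (pySplit ((PySem.List.pyGet? (pySplit j "^") 0).getD "") "_") 0).getD "") s)
      (fun s j => insertUniqueSorted ((PySem.List.pyGet? (pySplit ((PySem.List.pyGet? (pySplit j "^") 1).getD "") "_") 0).getD "") s)]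
  simp only [elem_eq]
  rw [foldl_insU_comp (fun j => (PySem.List.pyGet? (multiagent_action_to_single_agent_actions j) 0).getD "") joint_actions,
      foldl_insU_comp (fun j => (PySem.List.pyGet? (multiagent_action_to_single_agent_actions j) 1).getD "") joint_actions]
  simp [List.map_map, Function.comp_def]

-- ===== VERDICT (by name: the statement is the Claim_ definition above) =====
theorem get_unique_single_agent_actions_from_joint_actions_spec : Claim_equal_get_unique_single_agent_actions_from_joint_actions := by
  intro ja _ _
  exact get_unique_spec' ja
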